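-- pv_equiv track=rewrite | github.com/richeberry/Algorithm | 없는 숫자 더하기.py | solution
-- ===== SOURCE A (Python) =====
-- def solution(numbers):
--     origin = [i for i in range(0,9+1)]
--     numbers.sort()
--     answer = 0
--     for i in origin:
--         if i in numbers:
--             continue
--         else:
--             answer += i
--     return answer
-- ===== SOURCE B (Python) =====
-- def solution(numbers):
--     numbers.sort()
--     return 45 - sum(d for d in set(numbers) if 0 <= d <= 9)
-- ===== Notes on version B (the rewrite author's own statement) =====
-- stated objective: simpler
-- what changed: Replaces the 0..9 loop with a membership test by a closed form: 45 minus the sum of the distinct digits 0..9 present in the list (the in-place sort is kept for the side effect).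
import Mathlib
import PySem

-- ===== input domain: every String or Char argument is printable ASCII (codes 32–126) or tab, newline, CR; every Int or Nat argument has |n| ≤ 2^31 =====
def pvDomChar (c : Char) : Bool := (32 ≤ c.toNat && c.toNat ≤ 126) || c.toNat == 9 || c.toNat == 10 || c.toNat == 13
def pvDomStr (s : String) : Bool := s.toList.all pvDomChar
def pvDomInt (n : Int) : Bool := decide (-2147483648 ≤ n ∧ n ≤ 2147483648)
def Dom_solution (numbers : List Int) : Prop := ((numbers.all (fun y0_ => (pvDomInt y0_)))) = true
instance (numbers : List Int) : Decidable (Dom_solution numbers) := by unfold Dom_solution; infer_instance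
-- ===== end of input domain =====

-- B replaces the 0..9 loop with the closed form 45 - sum(distinct digits present); equal RETURN value —
-- both A and B also sort `numbers` in place in Python (same side effect).

-- ===== PORT A =====
def solution (numbers : List Int) : Int :=
  let origin := PySem.List.pyRange 0 (9 + 1) 1
  let ns := PySem.List.sorted numbers (fun x => x) false   -- numbers.sort() (in-place; return value read from the sorted list)
  origin.foldl (fun answer i => if i ∈ ns then answer else answer + i) 0

-- ===== PORT B =====
def solution_alt (numbers : List Int) : Int :=
  let _ns := PySem.List.sorted numbers (fun x => x) false  -- numbers.sort(): side effect only
  45 - ((PySem.Set.ofList numbers).filter (fun d => decide (0 ≤ d) && decide (d ≤ 9))).sum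

-- ===== PRECONDITION & SPEC =====
def Spec_solution (numbers : List Int) (out : Int) : Prop := out = solution_alt numbers
instance (numbers : List Int) (out : Int) : Decidable (Spec_solution numbers out) := by unfold Spec_solution; infer_instance

-- ===== CLAIM (what is proved, stated in full; the proofs are below) =====
def Claim_equal_solution : Prop := ∀ (numbers : List Int), Dom_solution numbers → Spec_solution numbers (solution numbers)

-- ===== LEMMAS AND PROOFS =====

theorem pv_fold_skip (ns : List Int) :
    ∀ (r : List Int) (a : Int),
      r.foldl (fun answer i => if i ∈ ns then answer else answer + i) a
        = a + r.sum - (r.filter (fun i => decide (i ∈ ns))).sum := by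
  intro r
  induction r with
  | nil => intro a; simp
  | cons x t ih =>
      intro a
      by_cases hx : x ∈ ns <;> simp [List.foldl, hx, ih] <;> ring

theorem pv_sum_eq (numbers : List Int) :
    ((([0,1,2,3,4,5,6,7,8,9] : List Int)).filter
        (fun i => decide (i ∈ numbers))).sum
      = ((PySem.Set.ofList numbers).filter (fun d => decide (0 ≤ d) && decide (d ≤ 9))).sum := by
  apply List.Perm.sum_eq
  rw [List.perm_ext_iff_of_nodup]
  · intro a
    simp only [List.mem_filter, decide_eq_true_eq, Bool.and_eq_true,
      PySem.Set.mem_ofList, List.mem_cons, List.not_mem_nil, or_false]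
    constructor
    · rintro ⟨hd, hmem⟩
      exact ⟨hmem, by omega, by omega⟩
    · rintro ⟨hmem, h0, h9⟩
      exact ⟨by omega, hmem⟩
  · exact (by decide : ([0,1,2,3,4,5,6,7,8,9] : List Int).Nodup).filter _
  · exact (PySem.Set.nodup_ofList numbers).filter _

-- ===== VERDICT (by name: the statement is the Claim_ definition above) =====
theorem solution_spec : Claim_equal_solution := by
  intro numbers _
  unfold Spec_solution solution solution_alt
  have hrange : PySem.List.pyRange 0 (9 + 1) 1 = ([0,1,2,3,4,5,6,7,8,9] : List Int) := by decide
  simp only [hrange, pv_fold_skip]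
  have hfil : (([0,1,2,3,4,5,6,7,8,9] : List Int)).filter
        (fun i => decide (i ∈ PySem.List.sorted numbers (fun x => x) false))
      = (([0,1,2,3,4,5,6,7,8,9] : List Int)).filter (fun i => decide (i ∈ numbers)) := by
    apply List.filter_congr
    intro i _
    simp [PySem.List.mem_sorted]
  rw [hfil, pv_sum_eq]
  have h45 : (([0,1,2,3,4,5,6,7,8,9] : List Int)).sum = 45 := by decide
  rw [h45]
  omega
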